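-- pv_equiv track=rewrite | github.com/orfadida2000/spotify_project | sp2genius/utils/identifier.py | is_dunder_identifier
-- ===== SOURCE A (Python) =====
-- def is_dunder_identifier(identifier: str) -> bool:
--     """
--     Check if a python identifier string is also a "dunder" (double underscore) identifier.
--
--     Args:
--         identifier: A valid python identifier string.
--
--     Returns: (bool)
--         True if the python identifier string is also a dunder identifier, False otherwise.
--     """
--     if not isinstance(identifier, str):
--         raise TypeError(f"identifier must be str, got: {type(identifier)}")
--
--     # Reject identifiers that are too short to be dunder (including "____")
--     if len(identifier) < 5:
--         return False
--
--     # At this point we know len(identifier) >= 5 so the 2 chars prefix and suffix are not overlapping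
--     # Rejects identifiers that do not start and end with double underscores
--     if not identifier.startswith("__") or not identifier.endswith("__"):
--         return False
--
--     # At this point we know len(identifier) >= 5 so we can safely slice the inner part
--     # Also, since len(identifier) >= 5, inner part cannot be empty
--     inner = identifier[2:-2]
--
--     # Rejects identifiers that have only underscores in the inner part
--     if all(c == "_" for c in inner):
--         return False
--
--     # At this point we know inner has at least one valid non-underscore character
--     # (validity of this 1 char is assumed because the whole identifier argument is assumed to be a valid python identifier)
--     # Rejects identifiers that start or end with an underscore in the inner part
--     # (i.e. identifiers that don't start and end with exactly two underscores)
--     if inner.startswith("_") or inner.endswith("_"):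
--         return False
--
--     return True
-- ===== SOURCE B (Python) =====
-- def is_dunder_identifier(identifier: str) -> bool:
--     """
--     Check if a python identifier string is also a "dunder" (double underscore) identifier.
--     """
--     if not isinstance(identifier, str):
--         raise TypeError(f"identifier must be str, got: {type(identifier)}")
--     n = len(identifier)
--     # Measure the run of underscores at each end of the string.
--     lead = 0
--     while lead < n and identifier[lead] == "_":
--         lead += 1
--     trail = 0
--     while trail < n and identifier[n - 1 - trail] == "_":
--         trail += 1
--     # Dunder == exactly two leading underscores, exactly two trailing
--     # underscores, and the two runs are disjoint (a non-underscore core exists).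
--     return lead == 2 and trail == 2 and lead + trail < n
-- ===== Notes on version B (the rewrite author's own statement) =====
-- stated objective: alternative
-- what changed: Instead of A's prefix/suffix tests plus an inner slice scanned by all(), B measures the leading and trailing underscore run lengths with two index loops and decides dunder-ness arithmetically: lead == 2 and trail == 2 and lead + trail < len.
import Mathlib
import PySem

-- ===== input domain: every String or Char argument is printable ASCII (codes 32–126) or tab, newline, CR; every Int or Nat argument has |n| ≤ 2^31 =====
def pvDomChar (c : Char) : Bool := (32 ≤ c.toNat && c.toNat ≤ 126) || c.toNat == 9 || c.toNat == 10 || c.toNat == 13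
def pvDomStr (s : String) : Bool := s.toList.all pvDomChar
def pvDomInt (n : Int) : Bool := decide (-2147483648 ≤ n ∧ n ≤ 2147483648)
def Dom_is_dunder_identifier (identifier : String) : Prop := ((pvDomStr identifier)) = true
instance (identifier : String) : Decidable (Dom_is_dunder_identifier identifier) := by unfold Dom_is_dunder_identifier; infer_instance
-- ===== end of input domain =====

-- B replaces A's prefix/suffix tests plus inner-slice all() scan by measuring the
-- leading and trailing underscore run lengths and deciding arithmetically.

-- ===== PORT A =====
def is_dunder_identifier (identifier : String) : Bool :=
  if PySem.Str.len identifier < 5 then false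
  else if !(PySem.Str.startswith identifier "__") || !(PySem.Str.endswith identifier "__") then false
  else
    let inner := PySem.Str.slice identifier (some 2) (some (-2))
    if inner.toList.all (fun c => c == '_') then false
    else if PySem.Str.startswith inner "_" || PySem.Str.endswith inner "_" then false
    else true

-- ===== PORT B =====
-- Source B's forward while-loop counting the leading '_' run, as the obvious
-- structural recursion on the character list; Source B's backward while-loop is the
-- same recursion on the reversed list.
def pvRunLen : List Char → Nat
  | [] => 0
  | ch :: t => if ch = '_' then pvRunLen t + 1 else 0

def is_dunder_identifier_alt (identifier : String) : Bool :=
  let l := identifier.toList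
  let lead := pvRunLen l
  let trail := pvRunLen l.reverse
  decide (lead = 2) && decide (trail = 2) && decide (lead + trail < l.length)

-- ===== PRECONDITION & SPEC =====
def Spec_is_dunder_identifier (identifier : String) (out : Bool) : Prop := out = is_dunder_identifier_alt identifier
instance (identifier : String) (out : Bool) : Decidable (Spec_is_dunder_identifier identifier out) := by unfold Spec_is_dunder_identifier; infer_instance

-- ===== CLAIM (what is proved, stated in full; the proofs are below) =====
def Claim_equal_is_dunder_identifier : Prop := ∀ (identifier : String), Dom_is_dunder_identifier identifier → Spec_is_dunder_identifier identifier (is_dunder_identifier identifier)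

-- ===== LEMMAS AND PROOFS =====

theorem pvRunLen_zero_cons (x : Char) (t : List Char) :
    pvRunLen (x :: t) = 0 ↔ x ≠ '_' := by
  simp only [pvRunLen]
  by_cases hx : x = '_' <;> simp [hx]

theorem pvRunLen_two (x y : Char) (t : List Char) :
    pvRunLen (x :: y :: t) = 2 ↔ (x = '_' ∧ y = '_' ∧ pvRunLen t = 0) := by
  simp only [pvRunLen]
  by_cases hx : x = '_' <;> by_cases hy : y = '_' <;> simp [hx, hy]

theorem suffix_pair_iff (pre : List Char) (d e x y : Char) :
    [x, y] <:+ (pre ++ [d, e]) ↔ (d = x ∧ e = y) := by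
  constructor
  · rintro ⟨t, ht⟩
    have h := congrArg List.reverse ht
    simp [List.reverse_append] at h
    exact ⟨h.2.1.symm, h.1.symm⟩
  · rintro ⟨rfl, rfl⟩
    exact ⟨pre, rfl⟩

theorem dunder_list_eq (l : List Char) (h5 : 5 ≤ l.length) :
    ((if !(PySem.Chars.startswith l ['_','_']) || !(PySem.Chars.endswith l ['_','_']) then false
      else if (PySem.Chars.slice l (some 2) (some (-2))).all (fun c => c == '_') then false
      else if PySem.Chars.startswith (PySem.Chars.slice l (some 2) (some (-2))) ['_']
              || PySem.Chars.endswith (PySem.Chars.slice l (some 2) (some (-2))) ['_'] then false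
      else true))
      = (decide (pvRunLen l = 2) && decide (pvRunLen l.reverse = 2)
          && decide (pvRunLen l + pvRunLen l.reverse < l.length)) := by
  obtain ⟨a, b, c, rest, rfl⟩ : ∃ a b c rest, l = a :: b :: c :: rest := by
    match l, h5 with
    | a :: b :: c :: rest, _ => exact ⟨a, b, c, rest, rfl⟩
  obtain ⟨mid, d, e, rfl⟩ : ∃ mid d e, rest = mid ++ [d, e] := by
    rcases hr : rest.reverse with _ | ⟨x, t1⟩
    · have : rest = [] := by simpa using congrArg List.reverse hr
      subst this; simp at h5
    · rcases t1 with _ | ⟨y, t⟩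
      · have : rest = [x] := by simpa using congrArg List.reverse hr
        subst this; simp at h5
      · exact ⟨t.reverse, y, x, by rw [← List.reverse_reverse rest, hr]; simp⟩
  have hinner : PySem.Chars.slice (a :: b :: c :: (mid ++ [d, e])) (some 2) (some (-2)) = c :: mid := by
    simp [PySem.List.slice]
  have hsw : PySem.Chars.startswith (a :: b :: c :: (mid ++ [d, e])) ['_','_']
      = (decide (a = '_') && decide (b = '_')) := by
    rw [Bool.eq_iff_iff]
    simp only [PySem.Chars.startswith_iff, List.cons_prefix_cons, List.nil_prefix, and_true,
      Bool.and_eq_true, decide_eq_true_eq]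
    exact ⟨fun ⟨h1, h2⟩ => ⟨h1.symm, h2.symm⟩, fun ⟨h1, h2⟩ => ⟨h1.symm, h2.symm⟩⟩
  have hew : PySem.Chars.endswith (a :: b :: c :: (mid ++ [d, e])) ['_','_']
      = (decide (d = '_') && decide (e = '_')) := by
    rw [Bool.eq_iff_iff]
    rw [PySem.Chars.endswith_iff,
        show a :: b :: c :: (mid ++ [d, e]) = (a :: b :: c :: mid) ++ [d, e] by simp,
        suffix_pair_iff]
    simp
  have hswi : PySem.Chars.startswith (c :: mid) ['_'] = decide (c = '_') := by
    rw [Bool.eq_iff_iff]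
    simp only [PySem.Chars.startswith_iff, List.cons_prefix_cons, List.nil_prefix, and_true,
      decide_eq_true_eq]
    exact eq_comm
  have hewi : PySem.Chars.endswith (c :: mid) ['_'] = decide ((c :: mid).getLast? = some '_') := by
    rw [Bool.eq_iff_iff]
    rw [PySem.Chars.endswith_iff]
    simp [List.getLast?_eq_some_iff]
    constructor
    · rintro ⟨t, ht⟩; exact ⟨t, ht.symm⟩
    · rintro ⟨t, ht⟩; exact ⟨t, ht.symm⟩
  have hrev : (a :: b :: c :: (mid ++ [d, e])).reverse
      = e :: d :: (mid.reverse ++ [c, b, a]) := by simp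
  have hlen : (a :: b :: c :: (mid ++ [d, e])).length = mid.length + 5 := by simp
  have hlead : pvRunLen (a :: b :: c :: (mid ++ [d, e])) = 2
      ↔ (a = '_' ∧ b = '_' ∧ c ≠ '_') := by
    rw [pvRunLen_two, pvRunLen_zero_cons]
  have htrail : pvRunLen (a :: b :: c :: (mid ++ [d, e])).reverse = 2
      ↔ (e = '_' ∧ d = '_' ∧ (c :: mid).getLast? ≠ some '_') := by
    rw [hrev, pvRunLen_two]
    rcases hm : mid.reverse with _ | ⟨z, t⟩
    · have : mid = [] := by simpa using congrArg List.reverse hm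
      subst this
      simp [pvRunLen_zero_cons]
    · have hmid : mid = t.reverse ++ [z] := by
        rw [← List.reverse_reverse mid, hm]; simp
      subst hmid
      simp only [List.cons_append, pvRunLen_zero_cons]
      constructor
      · rintro ⟨h1, h2, h3⟩
        refine ⟨h1, h2, ?_⟩
        simp only [show c :: (t.reverse ++ [z]) = (c :: t.reverse) ++ [z] from rfl,
          List.getLast?_append, List.getLast?_singleton]
        simp
        exact h3
      · rintro ⟨h1, h2, h3⟩
        refine ⟨h1, h2, ?_⟩
        simp only [show c :: (t.reverse ++ [z]) = (c :: t.reverse) ++ [z] from rfl,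
          List.getLast?_append, List.getLast?_singleton] at h3
        simp at h3
        exact h3
  rw [hinner, hsw, hew, hswi, hewi, Bool.eq_iff_iff]
  have hRiff : (decide (pvRunLen (a :: b :: c :: (mid ++ [d, e])) = 2)
      && decide (pvRunLen (a :: b :: c :: (mid ++ [d, e])).reverse = 2)
      && decide (pvRunLen (a :: b :: c :: (mid ++ [d, e]))
          + pvRunLen (a :: b :: c :: (mid ++ [d, e])).reverse
          < (a :: b :: c :: (mid ++ [d, e])).length)) = true
      ↔ ((a = '_' ∧ b = '_' ∧ c ≠ '_') ∧ (e = '_' ∧ d = '_' ∧ (c :: mid).getLast? ≠ some '_')) := by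
    simp only [Bool.and_eq_true, decide_eq_true_eq, hlead, htrail]
    constructor
    · rintro ⟨⟨h1, h2⟩, _⟩; exact ⟨h1, h2⟩
    · rintro ⟨h1, h2⟩
      refine ⟨⟨h1, h2⟩, ?_⟩
      rw [hlead.2 h1, htrail.2 h2, hlen]
      omega
  rw [hRiff]
  by_cases ha : a = '_' <;> by_cases hb : b = '_' <;> by_cases hd : d = '_' <;> by_cases he : e = '_' <;>
    simp [ha, hb, hd, he]
  by_cases hc : c = '_'
  · by_cases hall : ((c :: mid).all fun x => x == '_') = true <;> simp [hc]
  · simp [hc]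

-- ===== VERDICT (by name: the statement is the Claim_ definition above) =====
theorem is_dunder_identifier_spec : Claim_equal_is_dunder_identifier := by
  intro s _
  unfold Spec_is_dunder_identifier is_dunder_identifier is_dunder_identifier_alt
  simp only []
  by_cases h5 : PySem.Str.len s < 5
  · rw [if_pos h5]
    have hlen := PySem.Str.len_eq s
    rw [Bool.eq_iff_iff]
    simp only [Bool.and_eq_true, decide_eq_true_eq, Bool.false_eq_true, false_iff]
    rintro ⟨⟨h1, h2⟩, h3⟩
    omega
  · rw [if_neg h5]
    have h5' : 5 ≤ s.toList.length := by
      have := PySem.Str.len_eq s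
      omega
    have key := dunder_list_eq s.toList h5'
    simp only [PySem.Str.startswith_eq, PySem.Str.endswith_eq, PySem.Str.toList_slice] at *
    exact key
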